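-- pv_equiv track=rewrite | github.com/joelkuiper/PathoLens | src/protein_utils.py | _length_interleave_order
-- ===== SOURCE A (Python) =====
-- from typing import Tuple, Optional, List, Dict, Mapping
--
-- def _length_interleave_order(lengths: List[int], bin_size: int) -> List[int]:
--     """
--     Sort by length, then within windows interleave [long, short, long, short, ...].
--     This keeps batch Lmax relatively stable across the run and avoids the
--     "fast 60% then crawl" pattern.
--     """
--     order = sorted(range(len(lengths)), key=lambda i: lengths[i])
--     bins = [order[i : i + bin_size] for i in range(0, len(order), bin_size)]
--
--     def interleave_minmax(idxs: List[int]) -> List[int]: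
--         i, j, out = 0, len(idxs) - 1, []
--         while i <= j:
--             out.append(idxs[j])
--             j -= 1  # long
--             if i <= j:
--                 out.append(idxs[i])
--                 i += 1  # short
--         return out
--
--     schedule: List[int] = []
--     for idxs in bins:
--         schedule.extend(interleave_minmax(idxs))
--     return schedule
-- ===== SOURCE B (Python) =====
-- def _length_interleave_order(lengths, bin_size):
--     order = sorted(range(len(lengths)), key=lambda i: lengths[i])
--     out = []
--     for s in range(0, len(order), bin_size):
--         b = order[s : s + bin_size]
--         m = len(b)
--         longs = b[::-1][: (m + 1) // 2]   # long half, longest first (middle lands here on odd m)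
--         shorts = b[: m // 2]              # short half, shortest first
--         for lg, sh in zip(longs, shorts):
--             out.append(lg)
--             out.append(sh)
--         if len(shorts) < len(longs):
--             out.append(longs[-1])
--     return out
-- ===== Notes on version B (the rewrite author's own statement) =====
-- stated objective: alternative
-- what changed: Replaces the two-converging-pointer while loop per bin by precomputing the two half-lists (reversed long half, short half) and merging them with zip plus an odd-length tail, keeping sort and binning.
import Mathlib
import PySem

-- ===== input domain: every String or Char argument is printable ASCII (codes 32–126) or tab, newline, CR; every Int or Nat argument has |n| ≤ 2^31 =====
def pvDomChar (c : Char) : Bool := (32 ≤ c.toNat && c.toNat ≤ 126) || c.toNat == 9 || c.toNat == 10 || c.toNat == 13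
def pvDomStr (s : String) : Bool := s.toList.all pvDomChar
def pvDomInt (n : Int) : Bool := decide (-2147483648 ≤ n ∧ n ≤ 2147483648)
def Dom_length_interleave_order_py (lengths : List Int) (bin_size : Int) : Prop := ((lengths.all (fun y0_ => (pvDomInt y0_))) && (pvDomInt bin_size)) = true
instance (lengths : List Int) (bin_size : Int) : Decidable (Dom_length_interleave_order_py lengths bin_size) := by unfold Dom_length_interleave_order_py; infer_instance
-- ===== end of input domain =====

-- B replaces the per-bin two-pointer while loop by an explicit long-half/short-half split merged with zip (alternative decomposition, same cost).

-- ===== PORT A =====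
-- the inner `interleave_minmax` while loop: i, j converging pointers, out accumulator
def pvInterA (idxs : List Int) (i j : Int) (out : List Int) : List Int :=
  if i ≤ j then
    let out1 := out ++ [PySem.List.pyGetD idxs j 0]
    if i ≤ j - 1 then
      pvInterA idxs (i + 1) (j - 1) (out1 ++ [PySem.List.pyGetD idxs i 0])
    else
      pvInterA idxs i (j - 1) out1
  else out
termination_by (j - i + 1).toNat
decreasing_by all_goals omega

def length_interleave_order_py (lengths : List Int) (bin_size : Int) : List Int :=
  let order := PySem.List.sorted (PySem.List.pyRange 0 (lengths.length : Int) 1)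
      (fun i => PySem.List.pyGetD lengths i 0) false
  let bins := (PySem.List.pyRange 0 (order.length : Int) bin_size).map
      (fun i => PySem.List.slice order (some i) (some (i + bin_size)))
  bins.foldl (fun schedule idxs => schedule ++ pvInterA idxs 0 ((idxs.length : Int) - 1) []) []

-- ===== PORT B =====
def length_interleave_order_py_alt (lengths : List Int) (bin_size : Int) : List Int :=
  let order := PySem.List.sorted (PySem.List.pyRange 0 (lengths.length : Int) 1)
      (fun i => PySem.List.pyGetD lengths i 0) false
  (PySem.List.pyRange 0 (order.length : Int) bin_size).foldl
    (fun out s =>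
      let b := PySem.List.slice order (some s) (some (s + bin_size))
      let m : Int := (b.length : Int)
      let longs := PySem.List.slice ((PySem.List.slice? b none none (-1)).getD [])
          none (some (PySem.Int.floordiv (m + 1) 2))
      let shorts := PySem.List.slice b none (some (PySem.Int.floordiv m 2))
      let out1 := (longs.zip shorts).foldl (fun acc p => acc ++ [p.1, p.2]) out
      if shorts.length < longs.length then out1 ++ [PySem.List.pyGetD longs (-1) 0] else out1)
    []

-- ===== PRECONDITION & SPEC =====
-- Pre_ excludes exactly bin_size = 0, where Python's range(0, n, 0) raises ValueError (in both A and B).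
def Pre_length_interleave_order_py (lengths : List Int) (bin_size : Int) : Prop := bin_size ≠ 0
instance (lengths : List Int) (bin_size : Int) : Decidable (Pre_length_interleave_order_py lengths bin_size) := by unfold Pre_length_interleave_order_py; infer_instance
def pvWitness_length_interleave_order_py : List Int × Int := ([3, 1, 2, 5, 4], 2)

def Spec_length_interleave_order_py (lengths : List Int) (bin_size : Int) (out : List Int) : Prop := out = length_interleave_order_py_alt lengths bin_size
instance (lengths : List Int) (bin_size : Int) (out : List Int) : Decidable (Spec_length_interleave_order_py lengths bin_size out) := by unfold Spec_length_interleave_order_py; infer_instance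

-- ===== CLAIM (what is proved, stated in full; the proofs are below) =====
def Claim_equal_length_interleave_order_py : Prop := ∀ (lengths : List Int) (bin_size : Int), Dom_length_interleave_order_py lengths bin_size → Pre_length_interleave_order_py lengths bin_size → Spec_length_interleave_order_py lengths bin_size (length_interleave_order_py lengths bin_size)

-- ===== LEMMAS AND PROOFS =====

-- the per-bin schedule both programs produce: last, first, then recurse on the middle
def pvCore : List Int → List Int
  | [] => []
  | [x] => [x]
  | x :: y :: rest =>
      (y :: rest).getLast (by simp) :: x :: pvCore ((y :: rest).dropLast)
termination_by l => l.length
decreasing_by simp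

theorem pvCore_concat (x z : Int) (mid : List Int) :
    pvCore (x :: (mid ++ [z])) = z :: x :: pvCore mid := by
  cases h : mid ++ [z] with
  | nil => simp at h
  | cons y rest =>
    rw [pvCore]
    congr 1
    · simp [← h]
    · simp [← h]

-- B's half-split riffle of a bin equals the common schedule
theorem pvBCore_eq : ∀ (b : List Int),
    (((b.reverse.take ((b.length + 1) / 2)).zip (b.take (b.length / 2))).flatMap
        (fun p => [p.1, p.2])) ++
      (if (b.take (b.length / 2)).length < (b.reverse.take ((b.length + 1) / 2)).length
        then [PySem.List.pyGetD (b.reverse.take ((b.length + 1) / 2)) (-1) 0] else []) = pvCore b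
  | [] => by simp [pvCore]
  | [x] => by simp [pvCore, PySem.List.pyGetD, PySem.List.pyGet?, PySem.List.pyIdx?]
  | x :: y :: rest => by
    have hr : (y :: rest) ≠ [] := by simp
    obtain ⟨mid, z, hb⟩ : ∃ mid z, y :: rest = mid ++ [z] :=
      ⟨(y :: rest).dropLast, (y :: rest).getLast hr, by simp [List.dropLast_concat_getLast]⟩
    have hsz : mid.length < (x :: y :: rest).length := by
      have := congrArg List.length hb; simp at this ⊢; omega
    rw [hb]
    have ihm := pvBCore_eq mid
    have hL2 : (x :: (mid ++ [z])).length = mid.length + 2 := by simp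
    have h1 : (mid.length + 2 + 1) / 2 = (mid.length + 1) / 2 + 1 := by omega
    have h2 : (mid.length + 2) / 2 = mid.length / 2 + 1 := by omega
    have hrev : (x :: (mid ++ [z])).reverse = z :: (mid.reverse ++ [x]) := by simp
    have e1 : ((mid.length + 1) / 2 - mid.reverse.length) = 0 := by simp; omega
    have e2 : (mid.length / 2 - mid.length) = 0 := by omega
    rw [hL2, hrev, h1, h2, List.take_succ_cons, List.take_append, List.take_succ_cons,
      List.take_append, e1, e2]
    simp only [List.take_zero, List.append_nil]
    rw [pvCore_concat]
    rw [List.zip_cons_cons, List.flatMap_cons]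
    by_cases hc : (mid.take (mid.length / 2)).length < (mid.reverse.take ((mid.length + 1) / 2)).length
    · have hLne : mid.reverse.take ((mid.length + 1) / 2) ≠ [] := by
        intro h0; rw [h0] at hc; simp at hc
      have hcc : (x :: mid.take (mid.length / 2)).length <
          (z :: mid.reverse.take ((mid.length + 1) / 2)).length := by simpa using hc
      rw [if_pos hcc, if_pos hc] at *
      have hZne : (z :: List.take ((mid.length + 1) / 2) mid.reverse) ≠ [] := by simp
      rw [PySem.List.pyGetD_neg_one _ 0 hZne]
      rw [List.getLast_cons hLne]
      rw [← PySem.List.pyGetD_neg_one _ 0 hLne]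
      simp only [List.append_assoc]
      rw [ihm]
      simp
    · have hcc : ¬ (x :: mid.take (mid.length / 2)).length <
          (z :: mid.reverse.take ((mid.length + 1) / 2)).length := by simpa using hc
      rw [if_neg hcc, if_neg hc] at *
      simp only [List.append_nil] at ihm ⊢
      rw [ihm]
      simp
termination_by b => b.length
decreasing_by
  have := congrArg List.length hb; simp at this ⊢; omega

-- A's converging-pointer loop equals the common schedule on the window [i, j]
theorem pvInterA_eq (n : Nat) : ∀ (b : List Int) (i j : Int) (out : List Int),
    0 ≤ i → j < (b.length : Int) → (j - i + 1).toNat = n →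
    pvInterA b i j out = out ++ pvCore ((b.drop i.toNat).take n) := by
  induction n using Nat.strong_induction_on with
  | _ n ih =>
    intro b i j out hi hj hn
    rw [pvInterA]
    by_cases hij : i ≤ j
    · rw [if_pos hij]
      have ha : i.toNat + n = (j + 1).toNat := by omega
      have han : i.toNat + n ≤ b.length := by omega
      by_cases hij1 : i ≤ j - 1
      · rw [if_pos hij1]
        -- n ≥ 2
        obtain ⟨m, rfl⟩ : ∃ m, n = m + 2 := ⟨n - 2, by omega⟩
        rw [ih m (by omega) b (i + 1) (j - 1) _ (by omega) (by omega) (by omega)]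
        have hd1 : b.drop i.toNat = b[i.toNat] :: b.drop (i.toNat + 1) := by
          exact List.drop_eq_getElem_cons (by omega)
        have hw : (b.drop i.toNat).take (m + 2)
            = b[i.toNat] :: ((b.drop (i.toNat + 1)).take m ++ [b[i.toNat + 1 + m]]) := by
          rw [hd1, List.take_succ_cons]
          congr 1
          rw [List.take_add_one]
          congr 1
          rw [List.getElem?_drop, List.getElem?_eq_getElem (by omega)]
          rfl
        rw [hw, pvCore_concat]
        have g1 : PySem.List.pyGetD b j 0 = b[i.toNat + 1 + m] := by
          rw [PySem.List.pyGetD_eq_getElem b 0 (by omega) (by omega)]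
          congr 1
          omega
        have g2 : PySem.List.pyGetD b i 0 = b[i.toNat] := by
          rw [PySem.List.pyGetD_eq_getElem b 0 hi (by omega)]
        have g3 : (i + 1).toNat = i.toNat + 1 := by omega
        rw [g1, g2, g3]
        simp
      · rw [if_neg hij1]
        -- n = 1, i = j
        have hn1 : n = 1 := by omega
        subst hn1
        rw [pvInterA, if_neg (by omega : ¬ i ≤ j - 1)]
        have hw : (b.drop i.toNat).take 1 = [b[i.toNat]] := by
          rw [List.drop_eq_getElem_cons (by omega), List.take_succ_cons, List.take_zero]
          rfl
        rw [hw]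
        have g1 : PySem.List.pyGetD b j 0 = b[i.toNat] := by
          rw [PySem.List.pyGetD_eq_getElem b 0 (by omega) (by omega)]
          congr 1
          omega
        rw [g1]
        simp [pvCore]
    · rw [if_neg hij]
      have h0 : n = 0 := by omega
      rw [h0]
      simp [pvCore]

theorem pvInterA_whole (b : List Int) :
    pvInterA b 0 ((b.length : Int) - 1) [] = pvCore b := by
  rcases b with _ | ⟨x, t⟩
  · rw [pvInterA]
    simp [pvCore]
  · rw [pvInterA_eq (x :: t).length (x :: t) 0 ((x :: t).length - 1) [] (by omega) (by simp) (by simp)]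
    simp

-- B's per-bin body, for an arbitrary bin, appends the common schedule
theorem pvBinB_eq (out b : List Int) :
    (let m : Int := (b.length : Int)
     let longs := PySem.List.slice ((PySem.List.slice? b none none (-1)).getD [])
         none (some (PySem.Int.floordiv (m + 1) 2))
     let shorts := PySem.List.slice b none (some (PySem.Int.floordiv m 2))
     let out1 := (longs.zip shorts).foldl (fun acc p => acc ++ [p.1, p.2]) out
     if shorts.length < longs.length then out1 ++ [PySem.List.pyGetD longs (-1) 0] else out1)
    = out ++ pvCore b := by
  have f1 : PySem.Int.floordiv ((b.length : Int) + 1) 2 = (((b.length + 1) / 2 : Nat) : Int) := by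
    have h := PySem.Int.floordiv_natCast (b.length + 1) 2
    push_cast at h ⊢
    exact h
  have f2 : PySem.Int.floordiv (b.length : Int) 2 = ((b.length / 2 : Nat) : Int) := by
    exact_mod_cast PySem.Int.floordiv_natCast b.length 2
  simp only [PySem.List.slice?_none_none_neg_one, Option.getD_some, f1, f2,
    PySem.List.slice_to_natCast, PySem.List.foldl_append_eq_flatMap]
  rw [← pvBCore_eq b]
  split_ifs with h
  · rw [List.append_assoc]
  · simp

-- ===== VERDICT (by name: the statement is the Claim_ definition above) =====
theorem length_interleave_order_py_spec : Claim_equal_length_interleave_order_py := by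
  intro lengths bin_size _ _
  unfold Spec_length_interleave_order_py
  unfold length_interleave_order_py length_interleave_order_py_alt
  rw [List.foldl_map]
  congr 1
  funext sched s
  rw [pvInterA_whole, pvBinB_eq]
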